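-- pv_equiv track=rewrite | github.com/fernando29hernandez/-SA-TareaDocker_201403624 | app/Server.py | get_score_weighted
-- ===== SOURCE A (Python) =====
-- def get_score_weighted(board):
--
--     score = 0
--
--     boardHeuristic  =[
--         [1000, -10, 10, 10, 10, 10, -10, 1000], \
--         [-10, -10, 10, 1,  1,  10,  -10,  -10], \
--         [10,  10, 10,  1,  1,  10,  10,  10], \
--         [10,  1, 1,  1,  1,  1,  1,  10], \
--         [10,  1, 1,  1,  1,  1,  1,  10], \
--         [10,  10, 10,  1,  1,  10,  10,  10], \
--         [-10, -10, 10,  1,  1,  10, -10,  -10], \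
--         [1000, -10, 10, 10, 10, 10, -10, 1000]]
--
--     p1_count = 0
--     p2_count = 0
--     empty_spaces = 0
--     p1_weighted = 0
--     p2_weighted = 0
--
--     for i in range(len(board)):
--         for j in range(len(board)):
--             if board[i][j] == 0:
--                 empty_spaces +=1
--             elif board[i][j] == 1:
--                 p1_count += 1
--                 p1_weighted += boardHeuristic[i][j]
--             elif board[i][j] == 2:
--                 p2_count += 1
--                 p2_weighted += boardHeuristic[i][j]
--
--     if empty_spaces > 0:
--         return p1_weighted, p2_weighted
--     else:
--         return p1_count, p2_count
-- ===== SOURCE B (Python) =====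
-- def get_score_weighted(board):
--     boardHeuristic = [
--         [1000, -10, 10, 10, 10, 10, -10, 1000],
--         [-10, -10, 10, 1,  1,  10,  -10,  -10],
--         [10,  10, 10,  1,  1,  10,  10,  10],
--         [10,  1, 1,  1,  1,  1,  1,  10],
--         [10,  1, 1,  1,  1,  1,  1,  10],
--         [10,  10, 10,  1,  1,  10,  10,  10],
--         [-10, -10, 10,  1,  1,  10, -10,  -10],
--         [1000, -10, 10, 10, 10, 10, -10, 1000]]
--     n = len(board)
--     cells = [(i, j, board[i][j]) for i in range(n) for j in range(n)]
--     if any(v == 0 for _, _, v in cells):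
--         return (sum(boardHeuristic[i][j] for i, j, v in cells if v == 1),
--                 sum(boardHeuristic[i][j] for i, j, v in cells if v == 2))
--     return (sum(1 for _, _, v in cells if v == 1),
--             sum(1 for _, _, v in cells if v == 2))
-- ===== Notes on version B (the rewrite author's own statement) =====
-- stated objective: idiomatic
-- what changed: Instead of one nested loop threading five running accumulators and a final flag test, B materialises the (i,j,value) cells once with a comprehension, tests emptiness with any(), and computes the returned pair directly with sum() generator expressions, indexing the heuristic matrix only in the non-full branch.
import Mathlib
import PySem

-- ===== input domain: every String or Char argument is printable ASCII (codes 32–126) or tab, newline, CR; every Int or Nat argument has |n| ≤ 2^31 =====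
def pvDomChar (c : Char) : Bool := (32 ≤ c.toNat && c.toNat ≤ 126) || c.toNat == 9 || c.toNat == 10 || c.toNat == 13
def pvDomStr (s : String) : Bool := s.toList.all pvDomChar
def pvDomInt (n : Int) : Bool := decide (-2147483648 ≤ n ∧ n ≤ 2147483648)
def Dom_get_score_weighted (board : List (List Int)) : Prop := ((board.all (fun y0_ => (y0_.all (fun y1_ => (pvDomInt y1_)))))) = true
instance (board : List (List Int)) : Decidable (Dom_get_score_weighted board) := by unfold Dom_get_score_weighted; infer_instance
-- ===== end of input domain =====

-- B replaces A's nested loop with five accumulators by a cell list, any(), and sum() comprehensions (idiomatic; same cost).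

-- ===== PORT A =====
-- the boardHeuristic literal (shared by both ports, as in both Pythons)
def pvHeur : List (List Int) :=
  [[1000, -10, 10, 10, 10, 10, -10, 1000],
   [-10, -10, 10, 1, 1, 10, -10, -10],
   [10, 10, 10, 1, 1, 10, 10, 10],
   [10, 1, 1, 1, 1, 1, 1, 10],
   [10, 1, 1, 1, 1, 1, 1, 10],
   [10, 10, 10, 1, 1, 10, 10, 10],
   [-10, -10, 10, 1, 1, 10, -10, -10],
   [1000, -10, 10, 10, 10, 10, -10, 1000]]

-- boardHeuristic[i][j]; default only reached off Pre_ (Python raises there)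
def pvHeurAt (i j : Int) : Int := PySem.List.pyGetD (PySem.List.pyGetD pvHeur i []) j 0

-- board[i][j]; default only reached off Pre_ (Python raises there)
def pvCell (board : List (List Int)) (i j : Int) : Int :=
  PySem.List.pyGetD (PySem.List.pyGetD board i []) j 0

-- one iteration of A's inner loop body on the state (p1_count, p2_count, empty_spaces, p1_weighted, p2_weighted)
def pvStepA (s : Int × Int × Int × Int × Int) (c : Int × Int × Int) : Int × Int × Int × Int × Int :=
  if c.2.2 = 0 then (s.1, s.2.1, s.2.2.1 + 1, s.2.2.2.1, s.2.2.2.2)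
  else if c.2.2 = 1 then (s.1 + 1, s.2.1, s.2.2.1, s.2.2.2.1 + pvHeurAt c.1 c.2.1, s.2.2.2.2)
  else if c.2.2 = 2 then (s.1, s.2.1 + 1, s.2.2.1, s.2.2.2.1, s.2.2.2.2 + pvHeurAt c.1 c.2.1)
  else s

def get_score_weighted (board : List (List Int)) : Int × Int :=
  let n : Int := board.length
  let st :=
    (PySem.List.pyRange 0 n 1).foldl
      (fun s i =>
        (PySem.List.pyRange 0 n 1).foldl
          (fun s j => pvStepA s (i, j, pvCell board i j)) s)
      ((0 : Int), (0 : Int), (0 : Int), (0 : Int), (0 : Int))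
  if st.2.2.1 > 0 then (st.2.2.2.1, st.2.2.2.2) else (st.1, st.2.1)

-- ===== PORT B =====
-- the cells comprehension [(i, j, board[i][j]) for i in range(n) for j in range(n)]
def pvCells (board : List (List Int)) : List (Int × Int × Int) :=
  let n : Int := board.length
  (PySem.List.pyRange 0 n 1).flatMap
    (fun i => (PySem.List.pyRange 0 n 1).map (fun j => (i, j, pvCell board i j)))

def get_score_weighted_alt (board : List (List Int)) : Int × Int :=
  let cells := pvCells board
  if cells.any (fun c => c.2.2 == 0) then
    (cells.foldl (fun acc c => if c.2.2 = 1 then acc + pvHeurAt c.1 c.2.1 else acc) 0,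
     cells.foldl (fun acc c => if c.2.2 = 2 then acc + pvHeurAt c.1 c.2.1 else acc) 0)
  else
    (cells.foldl (fun acc c => if c.2.2 = 1 then acc + 1 else acc) 0,
     cells.foldl (fun acc c => if c.2.2 = 2 then acc + 1 else acc) 0)

-- ===== PRECONDITION & SPEC =====
-- Pre_ = exactly the inputs where Python A returns: every row at least len(board) long
-- (board[i][j] never IndexErrors), and no cell equal to 1 or 2 at a row or column index ≥ 8
-- inside the len(board)×len(board) region (boardHeuristic[i][j] never IndexErrors).
def Pre_get_score_weighted (board : List (List Int)) : Prop :=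
  (∀ row ∈ board, board.length ≤ row.length) ∧
  (∀ row ∈ board.drop 8, ∀ v ∈ row.take board.length, ¬(v = 1 ∨ v = 2)) ∧
  (∀ row ∈ board, ∀ v ∈ (row.take board.length).drop 8, ¬(v = 1 ∨ v = 2))

instance (board : List (List Int)) : Decidable (Pre_get_score_weighted board) := by
  unfold Pre_get_score_weighted; infer_instance

def pvWitness_get_score_weighted : List (List Int) := [[1, 2], [0, 1]]

def Spec_get_score_weighted (board : List (List Int)) (out : Int × Int) : Prop :=
  out = get_score_weighted_alt board
instance (board : List (List Int)) (out : Int × Int) : Decidable (Spec_get_score_weighted board out) := by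
  unfold Spec_get_score_weighted; infer_instance

-- ===== CLAIM (what is proved, stated in full; the proofs are below) =====
def Claim_equal_get_score_weighted : Prop :=
  ∀ (board : List (List Int)), Dom_get_score_weighted board → Pre_get_score_weighted board →
    Spec_get_score_weighted board (get_score_weighted board)

-- ===== LEMMAS AND PROOFS =====

-- a nested foldl over two index ranges is the foldl over the flattened cell list
theorem pv_foldl_nested {S : Type} (g : S → Int × Int × Int → S)
    (f : Int → Int → Int) (is js : List Int) : ∀ (s : S),
    is.foldl (fun s i => js.foldl (fun s j => g s (i, j, f i j)) s) s
      = (is.flatMap (fun i => js.map (fun j => (i, j, f i j)))).foldl g s := by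
  induction is with
  | nil => intro s; simp
  | cons i is ih =>
    intro s
    simp only [List.foldl_cons, List.flatMap_cons, List.foldl_append, List.foldl_map]
    exact ih _

-- shifting the accumulator out of a conditional counting foldl
theorem pv_shift_count (t : Int) :
    ∀ (cells : List (Int × Int × Int)) (a : Int),
    cells.foldl (fun acc c => if c.2.2 = t then acc + 1 else acc) a
      = a + cells.foldl (fun acc c => if c.2.2 = t then acc + 1 else acc) 0 := by
  intro cells
  induction cells with
  | nil => intro a; simp
  | cons c cells ih =>
    intro a
    simp only [List.foldl_cons]
    rw [ih, ih (if c.2.2 = t then 0 + 1 else 0)]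
    split_ifs <;> ring

-- shifting the accumulator out of a conditional weighted-sum foldl
theorem pv_shift_heur (t : Int) :
    ∀ (cells : List (Int × Int × Int)) (a : Int),
    cells.foldl (fun acc c => if c.2.2 = t then acc + pvHeurAt c.1 c.2.1 else acc) a
      = a + cells.foldl (fun acc c => if c.2.2 = t then acc + pvHeurAt c.1 c.2.1 else acc) 0 := by
  intro cells
  induction cells with
  | nil => intro a; simp
  | cons c cells ih =>
    intro a
    simp only [List.foldl_cons]
    rw [ih, ih (if c.2.2 = t then 0 + pvHeurAt c.1 c.2.1 else 0)]
    split_ifs <;> ring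

-- A's accumulator fold computed componentwise from B's four folds plus the empty count
theorem pv_fold_split : ∀ (cells : List (Int × Int × Int)) (s : Int × Int × Int × Int × Int),
    cells.foldl pvStepA s
      = (s.1 + cells.foldl (fun acc c => if c.2.2 = 1 then acc + 1 else acc) 0,
         s.2.1 + cells.foldl (fun acc c => if c.2.2 = 2 then acc + 1 else acc) 0,
         s.2.2.1 + cells.foldl (fun acc c => if c.2.2 = 0 then acc + 1 else acc) 0,
         s.2.2.2.1 + cells.foldl (fun acc c => if c.2.2 = 1 then acc + pvHeurAt c.1 c.2.1 else acc) 0,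
         s.2.2.2.2 + cells.foldl (fun acc c => if c.2.2 = 2 then acc + pvHeurAt c.1 c.2.1 else acc) 0) := by
  intro cells
  induction cells with
  | nil => intro s; simp
  | cons c cells ih =>
    intro s
    simp only [List.foldl_cons]
    rw [ih]
    rw [pv_shift_count 1 cells (if c.2.2 = 1 then 0 + 1 else 0),
        pv_shift_count 2 cells (if c.2.2 = 2 then 0 + 1 else 0),
        pv_shift_count 0 cells (if c.2.2 = 0 then 0 + 1 else 0),
        pv_shift_heur 1 cells (if c.2.2 = 1 then 0 + pvHeurAt c.1 c.2.1 else 0),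
        pv_shift_heur 2 cells (if c.2.2 = 2 then 0 + pvHeurAt c.1 c.2.1 else 0)]
    unfold pvStepA
    split_ifs <;> (try simp) <;> omega

-- the empty-space count is nonnegative
theorem pv_count_nonneg (t : Int) : ∀ (cells : List (Int × Int × Int)),
    0 ≤ cells.foldl (fun (acc : Int) c => if c.2.2 = t then acc + 1 else acc) 0 := by
  intro cells
  induction cells with
  | nil => simp
  | cons c cells ih =>
    simp only [List.foldl_cons]
    rw [pv_shift_count t cells]
    split_ifs <;> omega

-- the empty-space count is positive iff some cell is 0
theorem pv_count_pos_iff : ∀ (cells : List (Int × Int × Int)),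
    (cells.foldl (fun (acc : Int) c => if c.2.2 = 0 then acc + 1 else acc) 0 > 0)
      ↔ cells.any (fun c => c.2.2 == 0) = true := by
  intro cells
  induction cells with
  | nil => simp
  | cons c cells ih =>
    simp only [List.foldl_cons, List.any_cons]
    rw [pv_shift_count 0 cells]
    have := pv_count_nonneg 0 cells
    by_cases h : c.2.2 = 0 <;> simp [h, ← ih] <;> omega

-- ===== VERDICT (by name: the statement is the Claim_ definition above) =====
theorem get_score_weighted_spec : Claim_equal_get_score_weighted := by
  unfold Claim_equal_get_score_weighted
  intro board _ _
  unfold Spec_get_score_weighted get_score_weighted get_score_weighted_alt pvCells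
  simp only []
  rw [pv_foldl_nested pvStepA (pvCell board)]
  rw [pv_fold_split]
  simp only [zero_add, pv_count_pos_iff]
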